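-- pv_equiv track=rewrite | github.com/jyooj08/Problem-Solving | programmers/더_맵게.py | solution
-- ===== SOURCE A (Python) =====
-- import heapq
--
-- def solution(scoville, K):
--     answer = 0
--     heap = []
--     for x in scoville:
--         heapq.heappush(heap, x)
--
--     while True:
--         if not heap or heap[0] >= K:
--             break
--
--         if len(heap) < 2:
--             answer = -1
--             break
--
--         first = heapq.heappop(heap)
--         second = heapq.heappop(heap)
--         heapq.heappush(heap, first + second * 2)
--         answer += 1
--     return answer
-- ===== SOURCE B (Python) =====
-- def _insert_sorted(xs, v):
--     # insert v into the sorted list xs, before the first strictly larger element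
--     if not xs or v < xs[0]:
--         return [v] + xs
--     return [xs[0]] + _insert_sorted(xs[1:], v)
--
--
-- def solution(scoville, K):
--     foods = sorted(scoville)
--     answer = 0
--     while foods and foods[0] < K:
--         if len(foods) < 2:
--             return -1
--         first = foods[0]
--         second = foods[1]
--         foods = _insert_sorted(foods[2:], first + second * 2)
--         answer += 1
--     return answer
-- ===== Notes on version B (the rewrite author's own statement) =====
-- stated objective: simpler
-- what changed: Replaces the binary heap with a plain sorted list: sort once, take the two smallest from the front each round and re-insert the mix at its sorted position, instead of heap push/pop operations.
import Mathlib
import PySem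

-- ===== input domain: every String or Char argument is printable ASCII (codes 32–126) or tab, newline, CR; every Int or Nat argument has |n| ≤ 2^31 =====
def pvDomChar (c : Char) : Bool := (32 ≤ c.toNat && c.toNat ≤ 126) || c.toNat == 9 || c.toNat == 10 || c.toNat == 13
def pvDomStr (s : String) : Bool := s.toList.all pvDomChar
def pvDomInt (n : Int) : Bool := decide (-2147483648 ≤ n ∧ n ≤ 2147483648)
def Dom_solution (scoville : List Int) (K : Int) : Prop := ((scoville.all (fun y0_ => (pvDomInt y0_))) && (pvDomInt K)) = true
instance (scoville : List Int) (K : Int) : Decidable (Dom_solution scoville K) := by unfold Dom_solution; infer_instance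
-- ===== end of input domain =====

-- B replaces A's binary heap by a once-sorted list with in-order re-insertion (simpler, no heap machinery).

-- ===== PORT A =====
-- heapq is not covered by PySem; it is modeled here by its observable contract on Int
-- elements: heap[0] is the minimum, heappop removes and returns the minimum, heappush
-- adds the element.  Elements are Ints, so equal elements are indistinguishable and
-- this model is exact for every value A's code observes.
def heapLoopA (K : Int) (heap : List Int) (answer : Int) : Int :=
  match hm : heap.min? with
  | none => answer                                   -- "if not heap: break"
  | some m =>
    if K ≤ m then answer                             -- "heap[0] >= K: break"
    else if heap.length < 2 then -1                  -- "answer = -1; break"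
    else
      match hm2 : (heap.erase m).min? with           -- first = heappop; second = heappop
      | none => -1                                   -- unreachable: length ≥ 2
      | some m2 =>
        heapLoopA K (((heap.erase m).erase m2) ++ [m + m2 * 2]) (answer + 1)
termination_by heap.length
decreasing_by
  have h1 := List.length_erase_of_mem (List.min?_mem hm)
  have h2 := List.length_erase_of_mem (List.min?_mem hm2)
  simp only [List.length_append, List.length_cons, List.length_nil] at *
  omega

def solution (scoville : List Int) (K : Int) : Int :=
  heapLoopA K (scoville.foldl (fun h x => h ++ [x]) []) 0

-- ===== PORT B =====
def insertSorted (xs : List Int) (v : Int) : List Int :=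
  match xs with
  | [] => [v]
  | y :: ys => if v < y then v :: y :: ys else y :: insertSorted ys v

def mixLoopB (K : Int) (foods : List Int) (answer : Int) : Int :=
  match foods with
  | [] => answer
  | a :: rest =>
    if a < K then
      match rest with
      | [] => -1
      | b :: rest' => mixLoopB K (insertSorted rest' (a + b * 2)) (answer + 1)
    else answer
termination_by foods.length
decreasing_by
  have : ∀ (xs : List Int) (v : Int), (insertSorted xs v).length = xs.length + 1 := by
    intro xs v
    induction xs with
    | nil => simp [insertSorted]
    | cons y ys ih => simp only [insertSorted]; split <;> simp [ih]
  simp [this]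

def solution_alt (scoville : List Int) (K : Int) : Int :=
  mixLoopB K (PySem.List.sorted scoville (fun x => x) false) 0

-- ===== PRECONDITION & SPEC =====
def Spec_solution (scoville : List Int) (K : Int) (out : Int) : Prop := out = solution_alt scoville K
instance (scoville : List Int) (K : Int) (out : Int) : Decidable (Spec_solution scoville K out) := by unfold Spec_solution; infer_instance

-- ===== CLAIM (what is proved, stated in full; the proofs are below) =====
def Claim_equal_solution : Prop := ∀ (scoville : List Int) (K : Int), Dom_solution scoville K → Spec_solution scoville K (solution scoville K)

-- ===== LEMMAS AND PROOFS =====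
theorem insertSorted_perm (xs : List Int) (v : Int) : (insertSorted xs v).Perm (v :: xs) := by
  induction xs with
  | nil => simp [insertSorted]
  | cons y ys ih =>
    simp only [insertSorted]
    split
    · exact List.Perm.refl _
    · exact (List.Perm.cons y ih).trans (List.Perm.swap v y ys)

theorem insertSorted_pairwise (xs : List Int) (v : Int) (h : xs.Pairwise (· ≤ ·)) :
    (insertSorted xs v).Pairwise (· ≤ ·) := by
  induction xs with
  | nil => simp [insertSorted]
  | cons y ys ih =>
    rw [List.pairwise_cons] at h
    simp only [insertSorted]
    split
    · rename_i hlt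
      refine List.pairwise_cons.mpr ⟨?_, List.pairwise_cons.mpr h⟩
      intro b hb
      rcases List.mem_cons.mp hb with hb | hb
      · subst hb; exact le_of_lt hlt
      · exact le_of_lt (lt_of_lt_of_le hlt (h.1 b hb))
    · rename_i hge
      refine List.pairwise_cons.mpr ⟨?_, ih h.2⟩
      intro b hb
      rcases List.mem_cons.mp ((insertSorted_perm ys v).mem_iff.mp hb) with hb | hb
      · subst hb; exact le_of_not_gt hge
      · exact h.1 b hb

theorem foldl_append_id (xs : List Int) (acc : List Int) :
    xs.foldl (fun h x => h ++ [x]) acc = acc ++ xs := by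
  induction xs generalizing acc with
  | nil => simp
  | cons x xs ih => simp [List.foldl_cons, ih]

theorem loop_eq (K : Int) : ∀ (n : Nat) (h l : List Int) (ans : Int),
    h.length ≤ n → l.Perm h → l.Pairwise (· ≤ ·) →
    heapLoopA K h ans = mixLoopB K l ans := by
  intro n
  induction n with
  | zero =>
    intro h l ans hn hp _
    have hh : h = [] := List.eq_nil_of_length_eq_zero (Nat.le_zero.mp hn)
    subst hh
    have hl : l = [] := hp.eq_nil
    subst hl
    rw [heapLoopA, mixLoopB.eq_def]
    simp
  | succ n ih =>
    intro h l ans hn hp hs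
    cases l with
    | nil =>
      have hh : h = [] := hp.symm.eq_nil
      subst hh
      rw [heapLoopA, mixLoopB.eq_def]
      simp
    | cons a rest =>
      have ha_mem : a ∈ h := hp.mem_iff.mp (List.mem_cons_self)
      have hmin : h.min? = some a := by
        rw [List.min?_eq_some_iff]
        refine ⟨ha_mem, ?_⟩
        intro b hb
        rcases List.mem_cons.mp (hp.mem_iff.mpr hb) with hb' | hb'
        · omega
        · exact (List.pairwise_cons.mp hs).1 b hb'
      rw [heapLoopA]
      split
      · rename_i hm; rw [hmin] at hm; cases hm
      · rename_i m hm
        rw [hmin] at hm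
        injection hm with hm; subst hm
        by_cases hK : K ≤ a
        · rw [mixLoopB.eq_def]
          simp only [if_neg (not_lt.mpr hK)]
          simp [if_pos hK]
        · have haK : a < K := lt_of_not_ge hK
          simp only [if_neg hK]
          have hlen : h.length = rest.length + 1 := by
            have := hp.length_eq; simpa using this.symm
          by_cases hsmall : h.length < 2
          · have hrest : rest = [] := by
              have : rest.length = 0 := by omega
              exact List.eq_nil_of_length_eq_zero this
            subst hrest
            rw [if_pos hsmall, mixLoopB.eq_def]
            simp [haK]
          · simp only [if_neg hsmall]
            cases rest with
            | nil => exfalso; simp at hlen; omega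
            | cons b rest' =>
              have hrperm : (b :: rest').Perm (h.erase a) := by
                have := hp.erase a
                simpa using this
              have hb_min : (h.erase a).min? = some b := by
                rw [List.min?_eq_some_iff]
                refine ⟨hrperm.mem_iff.mp (List.mem_cons_self), ?_⟩
                intro c hc
                rcases List.mem_cons.mp (hrperm.mem_iff.mpr hc) with hc' | hc'
                · omega
                · exact (List.pairwise_cons.mp (List.pairwise_cons.mp hs).2).1 c hc'
              split
              · rename_i hm2; rw [hb_min] at hm2; cases hm2
              · rename_i m2 hm2
                rw [hb_min] at hm2
                injection hm2 with hm2; subst hm2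
                rw [mixLoopB.eq_def]
                simp only [if_pos haK]
                apply ih
                · have h1 := List.length_erase_of_mem ha_mem
                  have h2 := List.length_erase_of_mem (hrperm.mem_iff.mp (List.mem_cons_self) : b ∈ h.erase a)
                  simp only [List.length_append, List.length_cons, List.length_nil]
                  omega
                · have hX : rest'.Perm ((h.erase a).erase b) := by
                    have := hrperm.erase b
                    simpa using this
                  exact ((insertSorted_perm _ _).trans
                    (List.Perm.cons _ hX)).trans (List.perm_append_singleton _ _).symm
                · exact insertSorted_pairwise _ _ (List.pairwise_cons.mp (List.pairwise_cons.mp hs).2).2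

-- ===== VERDICT (by name: the statement is the Claim_ definition above) =====
theorem solution_spec : Claim_equal_solution := by
  intro scoville K _
  show solution scoville K = solution_alt scoville K
  unfold solution solution_alt
  rw [foldl_append_id]
  refine loop_eq K scoville.length _ _ 0 (by simp) ?_ ?_
  · exact PySem.List.sorted_perm scoville (fun x => x) false
  · exact PySem.List.sorted_pairwise scoville (fun x => x)
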